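-- pv_equiv track=rewrite | github.com/miliar/Code_Jam_Webscraper | solutions_python/solutions_year10_round1_nr1/38.py | check_diag1
-- ===== SOURCE A (Python) =====
-- def tr(n, x, y):
--     return (y * n) + x
--
-- def check_diag1(n, k, rot, c):
--     for y in range(n - 1, 0, -1):
--         x = 0
--         count = 0
--         while x < n and y < n:
--             if rot[tr(n, x, y)] == c:
--                 count += 1
--                 if count == k:
--                     return True
--             else:
--                 count = 0
--             x += 1
--             y += 1
--     for x in range(n):
--         y = 0
--         count = 0
--         while x < n and y < n:
--             if rot[tr(n, x, y)] == c:
--                 count += 1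
--                 if count == k:
--                     return True
--             else:
--                 count = 0
--             x += 1
--             y += 1
--     return False
-- ===== SOURCE B (Python) =====
-- def tr(n, x, y):
--     return (y * n) + x
--
-- def check_diag1(n, k, rot, c):
--     # Build an index of all diagonals (keyed by d = x - y) in one row-major pass,
--     # then run the same run-length counter over each diagonal's cell list.
--     diag = {}
--     for y in range(n):
--         for x in range(n):
--             diag.setdefault(x - y, []).append(rot[tr(n, x, y)])
--     for cells in diag.values():
--         count = 0
--         for cell in cells:
--             if cell == c:
--                 count += 1
--                 if count == k:
--                     return True
--             else:
--                 count = 0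
--     return False
-- ===== Notes on version B (the rewrite author's own statement) =====
-- stated objective: alternative
-- what changed: B replaces A's two edge-anchored interleaved while-loop walks with a single row-major pass building a dict of cell lists keyed by the diagonal index d = x - y, then applies the same run counter to each diagonal list.
-- outside the precondition, e.g. on check_diag1(2, 1, ['a', 'a', 'a'], 'a'): A returns True, B raises IndexError
import Mathlib
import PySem

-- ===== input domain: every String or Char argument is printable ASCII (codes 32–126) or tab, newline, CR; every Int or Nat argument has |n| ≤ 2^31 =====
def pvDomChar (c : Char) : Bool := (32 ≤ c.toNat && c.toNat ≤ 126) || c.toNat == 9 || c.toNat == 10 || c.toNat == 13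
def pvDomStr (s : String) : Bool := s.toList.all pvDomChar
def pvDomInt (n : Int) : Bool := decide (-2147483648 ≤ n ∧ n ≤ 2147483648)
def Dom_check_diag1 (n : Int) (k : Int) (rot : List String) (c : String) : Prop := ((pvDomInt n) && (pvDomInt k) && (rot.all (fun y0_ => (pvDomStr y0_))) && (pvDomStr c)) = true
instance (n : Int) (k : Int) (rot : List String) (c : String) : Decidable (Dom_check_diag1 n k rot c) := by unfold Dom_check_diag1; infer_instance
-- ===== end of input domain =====

-- B replaces A's two edge-anchored diagonal walks by one row-major pass building a dict of
-- per-diagonal cell lists (keyed by d = x - y), then runs the same run counter over each list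
-- (alternative decomposition, same asymptotic cost).


-- ===== PORT A =====
def tr (n x y : Int) : Int := (y * n) + x

-- the shared body of A's two textually identical 'while x < n and y < n' loops
-- (rot[tr(n,x,y)] is PySem.List.pyGetD with default ""; exact under Pre_, which rules out IndexError)
def diagScanA (n k : Int) (rot : List String) (c : String) (x y count : Int) : Bool :=
  if h : x < n ∧ y < n then
    if PySem.List.pyGetD rot (tr n x y) "" == c then
      if count + 1 == k then true
      else diagScanA n k rot c (x + 1) (y + 1) (count + 1)
    else diagScanA n k rot c (x + 1) (y + 1) 0
  else false
termination_by (n - x).toNat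
decreasing_by all_goals omega

def check_diag1 (n : Int) (k : Int) (rot : List String) (c : String) : Bool :=
  ((PySem.List.pyRange (n - 1) 0 (-1)).any (fun y => diagScanA n k rot c 0 y 0)) ||
  ((PySem.List.pyRange 0 n 1).any (fun x => diagScanA n k rot c x 0 0))

-- ===== PORT B =====
-- inner counter loop of B: 'for cell in cells: ...'
def runDiag (k : Int) (c : String) (cells : List String) (count : Int) : Bool :=
  match cells with
  | [] => false
  | cell :: rest =>
    if cell == c then
      if count + 1 == k then true else runDiag k c rest (count + 1)
    else runDiag k c rest 0

-- 'diag.setdefault(x - y, []).append(rot[tr(n, x, y)])' over all cells, row-major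
def buildDiag (n : Int) (rot : List String) : PySem.Dict Int (List String) :=
  (PySem.List.pyRange 0 n 1).foldl (fun d y =>
    (PySem.List.pyRange 0 n 1).foldl (fun d x =>
      d.modify (x - y) [] (fun l => l ++ [PySem.List.pyGetD rot (tr n x y) ""])) d)
    PySem.Dict.empty

def check_diag1_alt (n : Int) (k : Int) (rot : List String) (c : String) : Bool :=
  (buildDiag n rot).values.any (fun cells => runDiag k c cells 0)

-- ===== PRECONDITION & SPEC =====
-- Pre_ excludes grids with fewer than n*n cells, on which Python A raises IndexError
-- (or, if a run of k is met before the first missing cell, returns True while B, which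
-- reads every cell up front, raises IndexError there).
def Pre_check_diag1 (n : Int) (k : Int) (rot : List String) (c : String) : Prop :=
  n ≤ 0 ∨ n * n ≤ (rot.length : Int)
instance (n : Int) (k : Int) (rot : List String) (c : String) : Decidable (Pre_check_diag1 n k rot c) := by unfold Pre_check_diag1; infer_instance

def pvWitness_check_diag1 : Int × Int × List String × String := (2, 2, ["a", "b", "b", "a"], "b")

def Spec_check_diag1 (n : Int) (k : Int) (rot : List String) (c : String) (out : Bool) : Prop := out = check_diag1_alt n k rot c
instance (n : Int) (k : Int) (rot : List String) (c : String) (out : Bool) : Decidable (Spec_check_diag1 n k rot c out) := by unfold Spec_check_diag1; infer_instance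

-- ===== CLAIM (what is proved, stated in full; the proofs are below) =====
def Claim_equal_check_diag1 : Prop := ∀ (n : Int) (k : Int) (rot : List String) (c : String), Dom_check_diag1 n k rot c → Pre_check_diag1 n k rot c → Spec_check_diag1 n k rot c (check_diag1 n k rot c)

-- ===== LEMMAS AND PROOFS =====
-- the cell read at (x, y)
def cellv (n : Int) (rot : List String) (x y : Int) : String :=
  PySem.List.pyGetD rot (tr n x y) ""

-- the list of cells A's while loop visits starting at (x, y)
def cellsFrom (n : Int) (rot : List String) (x y : Int) : List String :=
  if h : x < n ∧ y < n then cellv n rot x y :: cellsFrom n rot (x + 1) (y + 1) else []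
termination_by (n - x).toNat
decreasing_by all_goals omega

-- the diagonal d = x - y = t as B's pass collects it (y increasing)
def diagList (n : Int) (rot : List String) (t : Int) : List String :=
  (PySem.List.pyRange (max 0 (-t)) (min n (n - t)) 1).map (fun y => cellv n rot (y + t) y)

-- the flattened stream of (key, cell) pairs B's double loop feeds the dict
def pairsOf (n : Int) (rot : List String) : List (Int × String) :=
  (PySem.List.pyRange 0 n 1).flatMap (fun y =>
    (PySem.List.pyRange 0 n 1).map (fun x => (x - y, cellv n rot x y)))

theorem scanA_eq_runDiag (n k : Int) (rot : List String) (c : String) (x y count : Int) :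
    diagScanA n k rot c x y count = runDiag k c (cellsFrom n rot x y) count := by
  fun_induction diagScanA n k rot c x y count with
  | case1 x y count h hc hk => rw [cellsFrom, dif_pos h]; simp [runDiag, cellv, hc, hk]
  | case2 x y count h hc hk ih => rw [cellsFrom, dif_pos h]; simp [runDiag, cellv, hc, hk, ih]
  | case3 x y count h hc ih => rw [cellsFrom, dif_pos h]; simp [runDiag, cellv, hc, ih]
  | case4 x y count h => rw [cellsFrom, dif_neg h]; simp [runDiag]

theorem cellsFrom_eq_map (n : Int) (rot : List String) (t : Int) :
    ∀ y, 0 ≤ y → 0 ≤ y + t →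
    cellsFrom n rot (y + t) y
      = (PySem.List.pyRange y (min n (n - t)) 1).map (fun y' => cellv n rot (y' + t) y') := by
  have key : ∀ m : Nat, ∀ y : Int, (n - y).toNat = m → 0 ≤ y → 0 ≤ y + t →
      cellsFrom n rot (y + t) y
        = (PySem.List.pyRange y (min n (n - t)) 1).map (fun y' => cellv n rot (y' + t) y') := by
    intro m
    induction m using Nat.strong_induction_on with
    | _ m ih =>
      intro y hm hy hx
      rw [cellsFrom]
      by_cases h : y + t < n ∧ y < n
      · rw [dif_pos h]
        have hlt : y < min n (n - t) := by omega
        rw [PySem.List.pyRange_one_cons hlt, List.map_cons]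
        have harg : y + t + 1 = (y + 1) + t := by ring
        rw [harg, ih (n - (y + 1)).toNat (by omega) (y + 1) rfl (by omega) (by omega)]
      · rw [dif_neg h]
        rw [PySem.List.pyRange_one_eq_nil (by omega), List.map_nil]
  exact fun y hy hx => key (n - y).toNat y rfl hy hx

theorem cellsFrom_eq_diagList_x (n : Int) (rot : List String) (t : Int) (ht : 0 ≤ t) :
    cellsFrom n rot t 0 = diagList n rot t := by
  have h := cellsFrom_eq_map n rot t 0 le_rfl (by omega)
  simp only [zero_add] at h
  rw [h, diagList]
  have hmax : max 0 (-t) = 0 := by omega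
  rw [hmax]

theorem cellsFrom_eq_diagList_y (n : Int) (rot : List String) (y : Int) (hy : 0 ≤ y) :
    cellsFrom n rot 0 y = diagList n rot (-y) := by
  have h := cellsFrom_eq_map n rot (-y) y hy (by omega)
  simp only [add_neg_cancel] at h
  rw [h, diagList]
  have hmax : max 0 (-(-y)) = y := by omega
  rw [hmax]

theorem buildDiag_eq_foldl_pairs (n : Int) (rot : List String) :
    buildDiag n rot =
      (pairsOf n rot).foldl (fun d p => d.modify p.1 [] (fun l => l ++ [p.2])) PySem.Dict.empty := by
  rw [pairsOf, List.foldl_flatMap]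
  simp only [List.foldl_map]
  rfl

theorem filter_map_pairs (n : Int) (rot : List String) (y t : Int) (l : List Int) :
    ((l.map (fun x => (x - y, cellv n rot x y))).filter (fun p => p.1 == t)).map (fun p => p.2)
      = (l.filter (fun x => x == y + t)).map (fun x => cellv n rot x y) := by
  induction l with
  | nil => simp
  | cons a as ih =>
    simp only [List.map_cons, List.filter_cons]
    have : (a - y == t) = (a == y + t) := by
      by_cases h : a - y = t
      · simp [h]; omega
      · have h2 : a ≠ y + t := by omega
        simp [h, h2]
    rw [this]
    by_cases h : a == y + t
    · simp only [h]
      simp [ih]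
    · simp only [h]
      simp at h
      simp [ih]

theorem filter_eq_pyRange (a b cc d : Int) :
    ((PySem.List.pyRange a b 1).filter (fun y => decide (cc ≤ y ∧ y < d)))
      = PySem.List.pyRange (max a cc) (min b d) 1 := by
  have key : ∀ m : Nat, ∀ a : Int, (b - a).toNat = m →
      ((PySem.List.pyRange a b 1).filter (fun y => decide (cc ≤ y ∧ y < d)))
        = PySem.List.pyRange (max a cc) (min b d) 1 := by
    intro m
    induction m using Nat.strong_induction_on with
    | _ m ih =>
      intro a hm
      by_cases hab : b ≤ a
      · rw [PySem.List.pyRange_one_eq_nil hab, List.filter_nil,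
            PySem.List.pyRange_one_eq_nil (by omega)]
      · rw [PySem.List.pyRange_one_cons (by omega), List.filter_cons,
            ih (b - (a + 1)).toNat (by omega) (a + 1) rfl]
        by_cases hc : cc ≤ a ∧ a < d
        · rw [if_pos (by simpa using hc)]
          have h1 : max a cc = a := by omega
          have h2 : max (a + 1) cc = a + 1 := by omega
          rw [h1, h2, ← PySem.List.pyRange_one_cons (by omega)]
        · rw [if_neg (by simpa using hc)]
          by_cases hca : a < cc
          · have : max a cc = max (a + 1) cc := by omega
            rw [this]
          · have hda : d ≤ a := by omega
            rw [PySem.List.pyRange_one_eq_nil (by omega),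
                PySem.List.pyRange_one_eq_nil (by omega)]
  exact key (b - a).toNat a rfl

theorem flatMap_if_singleton {α : Type} (l : List Int) (p : Int → Bool) (f : Int → α) :
    l.flatMap (fun y => if p y then [f y] else []) = (l.filter p).map f := by
  induction l with
  | nil => simp
  | cons a as ih =>
    simp only [List.flatMap_cons, List.filter_cons]
    by_cases h : p a
    · simp [h, ih]
    · simp [h, ih]

theorem row_filter (n : Int) (rot : List String) (y t : Int) :
    ((PySem.List.pyRange 0 n 1).filter (fun x => x == y + t)).map (fun x => cellv n rot x y)
      = if decide (0 ≤ y + t ∧ y + t < n) then [cellv n rot (y + t) y] else [] := by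
  have hcong : (PySem.List.pyRange 0 n 1).filter (fun x => x == y + t)
      = (PySem.List.pyRange 0 n 1).filter (fun x => decide (y + t ≤ x ∧ x < y + t + 1)) := by
    apply List.filter_congr
    intro x _
    rw [← Bool.coe_iff_coe]
    simp only [beq_iff_eq, decide_eq_true_eq]
    omega
  rw [hcong, filter_eq_pyRange]
  by_cases h : 0 ≤ y + t ∧ y + t < n
  · have h1 : max 0 (y + t) = y + t := by omega
    have h2 : min n (y + t + 1) = y + t + 1 := by omega
    rw [h1, h2, PySem.List.pyRange_one_singleton, if_pos (by simpa using h)]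
    simp
  · rw [PySem.List.pyRange_one_eq_nil (by omega), if_neg (by simpa using h)]
    simp

theorem getD_buildDiag (n : Int) (rot : List String) (t : Int) :
    (buildDiag n rot).getD t [] = diagList n rot t := by
  rw [buildDiag_eq_foldl_pairs, PySem.Dict.getD_foldl_modify_append]
  rw [PySem.Dict.getD_empty, List.nil_append, pairsOf]
  rw [List.filter_flatMap, List.map_flatMap]
  have hrow : ∀ y : Int,
      (((PySem.List.pyRange 0 n 1).map (fun x => (x - y, cellv n rot x y))).filter
          (fun p => p.1 == t)).map (fun p => p.2)
        = if decide (0 ≤ y + t ∧ y + t < n) then [cellv n rot (y + t) y] else [] := by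
    intro y
    rw [filter_map_pairs, row_filter]
  calc (PySem.List.pyRange 0 n 1).flatMap (fun y =>
          (((PySem.List.pyRange 0 n 1).map (fun x => (x - y, cellv n rot x y))).filter
            (fun p => p.1 == t)).map (fun p => p.2))
      = (PySem.List.pyRange 0 n 1).flatMap (fun y =>
          if decide (0 ≤ y + t ∧ y + t < n) then [cellv n rot (y + t) y] else []) := by
        exact List.flatMap_congr (fun y _ => hrow y)
    _ = ((PySem.List.pyRange 0 n 1).filter (fun y => decide (0 ≤ y + t ∧ y + t < n))).map
          (fun y => cellv n rot (y + t) y) := flatMap_if_singleton _ _ _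
    _ = diagList n rot t := by
        have hf : (PySem.List.pyRange 0 n 1).filter (fun y => decide (0 ≤ y + t ∧ y + t < n))
            = PySem.List.pyRange (max 0 (-t)) (min n (n - t)) 1 := by
          rw [List.filter_congr (q := fun y => decide (-t ≤ y ∧ y < n - t))
              (by intro x _; rw [← Bool.coe_iff_coe]; simp only [decide_eq_true_eq]; omega)]
          exact filter_eq_pyRange 0 n (-t) (n - t)
        rw [hf, diagList]

theorem keys_buildDiag_nodup (n : Int) (rot : List String) : (buildDiag n rot).keys.Nodup := by
  rw [buildDiag_eq_foldl_pairs, PySem.Dict.keys_foldl_modify_key]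
  exact PySem.Set.nodup_update _ _ (by simp [PySem.Dict.keys_empty])

theorem mem_keys_buildDiag (n : Int) (rot : List String) (t : Int) :
    t ∈ (buildDiag n rot).keys ↔
      ∃ y, (0 ≤ y ∧ y < n) ∧ ∃ x, (0 ≤ x ∧ x < n) ∧ x - y = t := by
  rw [buildDiag_eq_foldl_pairs, PySem.Dict.keys_foldl_modify_key, PySem.Set.mem_update]
  simp [PySem.Dict.keys_empty, pairsOf, List.mem_flatMap, PySem.List.mem_pyRange_one]

theorem alt_iff (n k : Int) (rot : List String) (c : String) :
    check_diag1_alt n k rot c = true ↔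
      ∃ t, t ∈ (buildDiag n rot).keys ∧ runDiag k c (diagList n rot t) 0 = true := by
  rw [check_diag1_alt,
      PySem.Dict.values_eq_map_keys (buildDiag n rot) (keys_buildDiag_nodup n rot) [],
      List.any_map, List.any_eq_true]
  constructor
  · rintro ⟨t, ht, hp⟩
    refine ⟨t, ht, ?_⟩
    rwa [Function.comp_apply, getD_buildDiag] at hp
  · rintro ⟨t, ht, hp⟩
    refine ⟨t, ht, ?_⟩
    rwa [Function.comp_apply, getD_buildDiag]

theorem a_iff (n k : Int) (rot : List String) (c : String) :
    check_diag1 n k rot c = true ↔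
      ((∃ y, (0 < y ∧ y ≤ n - 1) ∧ runDiag k c (diagList n rot (-y)) 0 = true) ∨
       (∃ x, (0 ≤ x ∧ x < n) ∧ runDiag k c (diagList n rot x) 0 = true)) := by
  rw [check_diag1, Bool.or_eq_true, List.any_eq_true, List.any_eq_true]
  constructor
  · rintro (⟨y, hy, hp⟩ | ⟨x, hx, hp⟩)
    · rw [PySem.List.mem_pyRange_neg_one] at hy
      left
      refine ⟨y, ⟨hy.1, hy.2⟩, ?_⟩
      rwa [scanA_eq_runDiag, cellsFrom_eq_diagList_y n rot y (by omega)] at hp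
    · rw [PySem.List.mem_pyRange_one] at hx
      right
      refine ⟨x, hx, ?_⟩
      rwa [scanA_eq_runDiag, cellsFrom_eq_diagList_x n rot x hx.1] at hp
  · rintro (⟨y, hy, hp⟩ | ⟨x, hx, hp⟩)
    · refine Or.inl ⟨y, PySem.List.mem_pyRange_neg_one.mpr ⟨hy.1, hy.2⟩, ?_⟩
      rwa [scanA_eq_runDiag, cellsFrom_eq_diagList_y n rot y (by omega)]
    · refine Or.inr ⟨x, PySem.List.mem_pyRange_one.mpr hx, ?_⟩
      rwa [scanA_eq_runDiag, cellsFrom_eq_diagList_x n rot x hx.1]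

theorem main_eq (n k : Int) (rot : List String) (c : String) :
    check_diag1 n k rot c = check_diag1_alt n k rot c := by
  rw [← Bool.coe_iff_coe, a_iff, alt_iff]
  constructor
  · rintro (⟨y, hy, hp⟩ | ⟨x, hx, hp⟩)
    · exact ⟨-y, (mem_keys_buildDiag n rot (-y)).mpr
        ⟨y, ⟨by omega, by omega⟩, 0, ⟨le_rfl, by omega⟩, by omega⟩, hp⟩
    · exact ⟨x, (mem_keys_buildDiag n rot x).mpr
        ⟨0, ⟨le_rfl, by omega⟩, x, hx, by omega⟩, hp⟩
  · rintro ⟨t, ht, hp⟩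
    rcases (mem_keys_buildDiag n rot t).mp ht with ⟨y, hy, x, hx, hxy⟩
    by_cases h0 : 0 ≤ t
    · exact Or.inr ⟨t, ⟨h0, by omega⟩, hp⟩
    · refine Or.inl ⟨-t, ⟨by omega, by omega⟩, ?_⟩
      rwa [neg_neg]

-- ===== VERDICT (by name: the statement is the Claim_ definition above) =====
theorem check_diag1_spec : Claim_equal_check_diag1 := by
  intro n k rot c _ _
  unfold Spec_check_diag1
  exact main_eq n k rot c
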